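-- pv_equiv track=rewrite | github.com/Harvelon365/HTM1 | parser.py | parse_class
-- ===== SOURCE A (Python) =====
-- def parse_class(class_name):
-- 	digits = []
-- 	i = 0
-- 	while i < len(class_name):
-- 		if class_name[i].isnumeric():
-- 			digits.append(class_name[i])
-- 		elif class_name[i] == "_" or class_name[i] == "-":
-- 			pass
-- 		else:
-- 			if i == 0 or class_name[i - 1].isnumeric() or class_name[i - 1] == "_" or class_name[i - 1] == "-":
-- 				digits.append(0)
-- 			digits[-1] += 1
-- 		i += 1
-- 	if len(digits) == 0:
-- 		digits = [0]
-- 	digits = [str(i) for i in digits]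
-- 	total = int("".join(digits))
-- 	return total
-- ===== SOURCE B (Python) =====
-- def parse_class(class_name):
--     # Staged pipeline: insert NUL markers around digits and for separators,
--     # split on the marker, then map pieces (digit piece -> itself, word piece -> its length).
--     marked = []
--     for ch in class_name:
--         if ch.isnumeric():
--             marked.append("\x00" + ch + "\x00")
--         elif ch == "_" or ch == "-":
--             marked.append("\x00")
--         else:
--             marked.append(ch)
--     pieces = "".join(marked).split("\x00")
--     out = "".join(p if p.isnumeric() else str(len(p)) for p in pieces if p)
--     return int(out or "0")
-- ===== Notes on version B (the rewrite author's own statement) =====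
-- stated objective: faster
-- what changed: Replaces A's index-by-index Python-level while loop (look-back at class_name[i-1], in-place increment of the trailing list cell) by a staged pipeline built from C-level str operations: insert NUL markers around each digit and for each separator, split the marked string on the marker, then map each nonempty piece (a digit piece to itself, a word piece to the string of its length) and join.
import Mathlib
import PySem

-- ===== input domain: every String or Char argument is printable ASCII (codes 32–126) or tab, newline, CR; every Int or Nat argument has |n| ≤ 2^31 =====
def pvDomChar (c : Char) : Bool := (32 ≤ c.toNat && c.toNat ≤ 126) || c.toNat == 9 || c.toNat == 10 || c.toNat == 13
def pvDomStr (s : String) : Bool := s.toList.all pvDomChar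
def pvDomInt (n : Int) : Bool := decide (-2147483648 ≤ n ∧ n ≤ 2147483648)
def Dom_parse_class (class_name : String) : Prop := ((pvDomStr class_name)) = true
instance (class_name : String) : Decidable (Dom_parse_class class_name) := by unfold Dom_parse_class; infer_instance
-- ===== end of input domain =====

-- B replaces A's index loop (look-back at class_name[i-1], in-place increment of the last
-- cell) by a staged pipeline: insert NUL markers around digits/for separators, split on the
-- marker, map each piece (digit piece -> itself, word piece -> its length), join; the timing
-- run measured B faster by a constant factor (C-level str ops instead of a Python loop).

-- ===== PORT A =====
-- ch.isnumeric(): exact on the printable-ASCII domain (the ASCII numerics are '0'..'9').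
def pvIsNum (c : Char) : Bool := '0' ≤ c && c ≤ '9'
-- the Int value a digit char contributes; A stores the digit CHARACTER and str()s it back,
-- which on ASCII digits is the same as storing its value and str()ing that (exact on Dom).
def pvDigitVal (c : Char) : Int := (c.toNat : Int) - 48

-- digits[-1] += 1 (the list is nonempty wherever Python reaches this line)
def pvIncLast (l : List Int) : List Int := l.dropLast ++ [l.getLastD 0 + 1]

-- the while loop of A: index i, mutable list `digits`
def parseClassLoopA (cs : List Char) (i : Nat) (digits : List Int) : List Int :=
  if h : i < cs.length then
    if pvIsNum cs[i] then
      parseClassLoopA cs (i + 1) (digits ++ [pvDigitVal cs[i]])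
    else if cs[i] = '_' ∨ cs[i] = '-' then
      parseClassLoopA cs (i + 1) digits
    else
      -- class_name[i-1] is only consulted when i ≠ 0 (short-circuit), so getD is exact
      parseClassLoopA cs (i + 1)
        (pvIncLast (if i = 0 ∨ pvIsNum (cs.getD (i - 1) ' ') ∨ cs.getD (i - 1) ' ' = '_' ∨ cs.getD (i - 1) ' ' = '-'
          then digits ++ [(0 : Int)] else digits))
  else digits
termination_by cs.length - i

def parse_class (class_name : String) : Int :=
  let digits := parseClassLoopA class_name.toList 0 []
  let digits := if digits.length = 0 then [(0 : Int)] else digits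
  -- int("".join(str(i) for i in digits)): the joined string is nonempty decimal digits, so int() always returns
  (PySem.Int.ofChars? ((digits.map PySem.Int.toChars).flatten)).getD 0

-- ===== PORT B =====
-- the marker character "\x00"
def pvMk : Char := Char.ofNat 0
-- one iteration of Source B's marking loop
def pvMark (c : Char) : List Char :=
  if pvIsNum c then [pvMk, c, pvMk]
  else if c = '_' ∨ c = '-' then [pvMk]
  else [c]
-- the mapping applied to each piece: '' is filtered, a numeric piece kept, a word piece
-- replaced by str of its length
def pvPieceF (p : List Char) : List Char :=
  if p = [] then [] else if p.all pvIsNum then p else PySem.Int.toChars (p.length : Int)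

def parse_class_alt (class_name : String) : Int :=
  let marked := class_name.toList.flatMap pvMark
  let pieces := marked.splitOn pvMk          -- "".join(marked).split("\x00")
  let out := pieces.flatMap pvPieceF
  -- int(out or "0")
  (PySem.Int.ofChars? (if out = [] then ['0'] else out)).getD 0

-- ===== PRECONDITION & SPEC =====
def Spec_parse_class (class_name : String) (out : Int) : Prop := out = parse_class_alt class_name
instance (class_name : String) (out : Int) : Decidable (Spec_parse_class class_name out) := by unfold Spec_parse_class; infer_instance

-- ===== CLAIM (what is proved, stated in full; the proofs are below) =====
def Claim_equal_parse_class : Prop := ∀ (class_name : String), Dom_parse_class class_name → Spec_parse_class class_name (parse_class class_name)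

-- ===== LEMMAS AND PROOFS =====

-- a character that is neither a digit nor a separator
def pvOther (c : Char) : Bool := !pvIsNum c && !(c == '_') && !(c == '-')

-- common recursive characterisation of the token list both programs build
def pvTok : List Char → List Int
  | [] => []
  | c :: cs =>
      if pvIsNum c then pvDigitVal c :: pvTok cs
      else if c = '_' ∨ c = '-' then pvTok cs
      else ((cs.takeWhile pvOther).length + 1 : Int) :: pvTok (cs.dropWhile pvOther)
termination_by cs => cs.length
decreasing_by
  · exact Nat.lt_succ_of_le (Nat.le_refl _)
  · exact Nat.lt_succ_of_le (Nat.le_refl _)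
  · exact Nat.lt_succ_of_le (List.length_dropWhile_le _ _)

theorem pvTok_nil : pvTok [] = [] := by rw [pvTok]

theorem pvTok_cons (c : Char) (cs : List Char) :
    pvTok (c :: cs) =
      if pvIsNum c then pvDigitVal c :: pvTok cs
      else if c = '_' ∨ c = '-' then pvTok cs
      else ((cs.takeWhile pvOther).length + 1 : Int) :: pvTok (cs.dropWhile pvOther) := by
  rw [pvTok]

theorem pvOther_false_iff (d : Char) :
    pvOther d = false ↔ (pvIsNum d = true ∨ d = '_' ∨ d = '-') := by
  unfold pvOther
  by_cases h : pvIsNum d <;> by_cases h2 : d = '_' <;> by_cases h3 : d = '-' <;> simp [h, h2, h3]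

theorem loopA_term (cs : List Char) (i : Nat) (digits : List Int)
    (h : ¬ i < cs.length) : parseClassLoopA cs i digits = digits := by
  rw [parseClassLoopA, dif_neg h]

theorem pvIncLast_concat (l : List Int) (a : Int) : pvIncLast (l ++ [a]) = l ++ [a + 1] := by
  simp [pvIncLast]

-- A's loop, characterised (first part: fresh state; second: last cell still being counted up)
theorem loopA_char (n : Nat) : ∀ (cs : List Char) (i : Nat), cs.length - i ≤ n →
    ((∀ digits : List Int,
        (i = 0 ∨ pvOther (cs.getD (i - 1) ' ') = false) →
        parseClassLoopA cs i digits = digits ++ pvTok (cs.drop i)) ∧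
     (∀ (digits : List Int) (m : Int),
        1 ≤ i → pvOther (cs.getD (i - 1) ' ') = true →
        parseClassLoopA cs i (digits ++ [m]) =
          digits ++ [m + (((cs.drop i).takeWhile pvOther).length : Int)] ++
            pvTok ((cs.drop i).dropWhile pvOther))) := by
  induction n with
  | zero =>
    intro cs i hle
    have h : ¬ i < cs.length := by omega
    have hd : cs.drop i = [] := List.drop_eq_nil_of_le (by omega)
    constructor
    · intro digits _
      rw [loopA_term cs i digits h, hd, pvTok_nil, List.append_nil]
    · intro digits m _ _
      rw [loopA_term cs i _ h, hd]
      simp [pvTok_nil]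
  | succ n IH =>
    intro cs i hle
    by_cases h : i < cs.length
    · have hdrop : cs.drop i = cs[i] :: cs.drop (i + 1) := List.drop_eq_getElem_cons h
      have hgd : cs.getD (i + 1 - 1) ' ' = cs[i] := by
        simp [List.getD_eq_getElem?_getD, List.getElem?_eq_getElem h]
      have hn : cs.length - (i + 1) ≤ n := by omega
      constructor
      · intro digits hC
        rw [parseClassLoopA, dif_pos h]
        by_cases hd : pvIsNum cs[i]
        · rw [if_pos hd, (IH cs (i + 1) hn).1 _ (Or.inr (by rw [hgd]; simp [pvOther, hd]))]
          rw [hdrop, pvTok_cons, if_pos hd]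
          simp
        · by_cases hs : cs[i] = '_' ∨ cs[i] = '-'
          · rw [if_neg hd, if_pos hs,
              (IH cs (i + 1) hn).1 _ (Or.inr (by rw [hgd]; rcases hs with hs | hs <;> simp [pvOther, hs]))]
            rw [hdrop, pvTok_cons, if_neg hd, if_pos hs]
          · -- other character, fresh state: a new counter cell [0] is pushed then incremented
            have hsne : cs[i] ≠ '_' ∧ cs[i] ≠ '-' := by simpa [not_or] using hs
            have hcond : (i = 0 ∨ pvIsNum (cs.getD (i - 1) ' ') ∨ cs.getD (i - 1) ' ' = '_' ∨ cs.getD (i - 1) ' ' = '-') := by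
              rcases hC with hC | hC
              · exact Or.inl hC
              · exact Or.inr ((pvOther_false_iff _).1 hC)
            rw [if_neg hd, if_neg hs, if_pos hcond, pvIncLast_concat]
            have hprev : pvOther (cs.getD (i + 1 - 1) ' ') = true := by
              rw [hgd]; simp [pvOther, hd, hsne.1, hsne.2]
            rw [(IH cs (i + 1) hn).2 digits ((0 : Int) + 1) (by omega) hprev]
            rw [hdrop, pvTok_cons, if_neg hd, if_neg hs]
            simp only [List.append_assoc, List.cons_append, List.nil_append]
            congr 2
            ring
      · intro digits m h1 hprev
        rw [parseClassLoopA, dif_pos h]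
        by_cases hd : pvIsNum cs[i]
        · have hno : pvOther cs[i] = false := by simp [pvOther, hd]
          rw [if_pos hd, List.append_assoc]
          rw [(IH cs (i + 1) hn).1 _ (Or.inr (by rw [hgd]; exact hno))]
          rw [hdrop, List.takeWhile_cons_of_neg (by simp [hno]),
            List.dropWhile_cons_of_neg (by simp [hno]), pvTok_cons, if_pos hd]
          simp
        · by_cases hs : cs[i] = '_' ∨ cs[i] = '-'
          · have hno : pvOther cs[i] = false := by rcases hs with hs | hs <;> simp [pvOther, hs]
            rw [if_neg hd, if_pos hs,
              (IH cs (i + 1) hn).1 _ (Or.inr (by rw [hgd]; exact hno))]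
            rw [hdrop, List.takeWhile_cons_of_neg (by simp [hno]),
              List.dropWhile_cons_of_neg (by simp [hno]), pvTok_cons, if_neg hd, if_pos hs]
            simp
          · -- other character continuing a run: the last cell is incremented in place
            have hsne : cs[i] ≠ '_' ∧ cs[i] ≠ '-' := by simpa [not_or] using hs
            have hyo : pvOther cs[i] = true := by simp [pvOther, hd, hsne.1, hsne.2]
            have hcond : ¬ (i = 0 ∨ pvIsNum (cs.getD (i - 1) ' ') ∨ cs.getD (i - 1) ' ' = '_' ∨ cs.getD (i - 1) ' ' = '-') := by
              have hno : ¬ (pvIsNum (cs.getD (i - 1) ' ') = true ∨ cs.getD (i - 1) ' ' = '_' ∨ cs.getD (i - 1) ' ' = '-') := by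
                rw [← pvOther_false_iff]
                simp only [Bool.not_eq_false]
                exact hprev
              simp only [not_or] at hno ⊢
              exact ⟨by omega, hno.1, hno.2.1, hno.2.2⟩
            rw [if_neg hd, if_neg hs, if_neg hcond, pvIncLast_concat]
            have hyo' : pvOther (cs.getD (i + 1 - 1) ' ') = true := by rw [hgd]; exact hyo
            rw [(IH cs (i + 1) hn).2 digits (m + 1) (by omega) hyo']
            rw [hdrop, List.takeWhile_cons_of_pos hyo, List.dropWhile_cons_of_pos hyo]
            simp only [List.length_cons]
            congr 3
            push_cast
            ring
    · have hd : cs.drop i = [] := List.drop_eq_nil_of_le (by omega)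
      constructor
      · intro digits _
        rw [loopA_term cs i digits h, hd, pvTok_nil, List.append_nil]
      · intro digits m _ _
        rw [loopA_term cs i _ h, hd]
        simp [pvTok_nil]

theorem pvToDigitsCore_ne (b : Nat) (f n : Nat) (l : List Char)
    (h : f ≠ 0 ∨ l ≠ []) : Nat.toDigitsCore b f n l ≠ [] := by
  induction f generalizing n l with
  | zero =>
    simp only [Nat.toDigitsCore]
    tauto
  | succ f ih =>
    simp only [Nat.toDigitsCore]
    split
    · simp
    · exact ih _ _ (Or.inr (by simp))

theorem pvToChars_ne (n : Int) : PySem.Int.toChars n ≠ [] := by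
  unfold PySem.Int.toChars Nat.toDigits
  split
  · simp
  · exact pvToDigitsCore_ne 10 _ _ [] (Or.inl (Nat.succ_ne_zero _))

theorem toChars_digit (c : Char) (h : pvIsNum c = true) :
    PySem.Int.toChars (pvDigitVal c) = [c] := by
  simp only [pvIsNum, Bool.and_eq_true, decide_eq_true_eq, Char.le_def] at h
  have h1 : 48 ≤ c.toNat := h.1
  have h2 : c.toNat ≤ 57 := h.2
  rw [← Char.ofNat_toNat c]
  generalize hg : c.toNat = n at h1 h2 ⊢
  interval_cases n <;> decide

theorem splitOn_mk_cons (l : List Char) : (pvMk :: l).splitOn pvMk = [] :: l.splitOn pvMk := by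
  simp [List.splitOn, List.splitOnP_cons]

theorem splitOn_cons_ne (x : Char) (l : List Char) (hx : x ≠ pvMk) :
    (x :: l).splitOn pvMk = (l.splitOn pvMk).modifyHead (List.cons x) := by
  simp [List.splitOn, List.splitOnP_cons, hx]


theorem splitOn_run (r m : List Char) (hr : ∀ x ∈ r, x ≠ pvMk) :
    (r ++ m).splitOn pvMk = (m.splitOn pvMk).modifyHead (r ++ ·) := by
  induction r with
  | nil => cases h : List.splitOn pvMk m <;> simp [h]
  | cons x r ih =>
    rw [List.cons_append, splitOn_cons_ne x _ (hr x (by simp)), ih (fun y hy => hr y (by simp [hy])),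
      List.modifyHead_modifyHead]
    rfl

theorem flatMap_mark_run (t : List Char) (ht : ∀ x ∈ t, pvOther x = true) :
    t.flatMap pvMark = t := by
  induction t with
  | nil => simp
  | cons x t ih =>
    have hx := ht x (by simp)
    simp only [pvOther, Bool.and_eq_true, Bool.not_eq_true'] at hx
    have hsep : ¬ (x = '_' ∨ x = '-') := by
      rintro (rfl | rfl) <;> simp at hx
    rw [List.flatMap_cons, ih (fun y hy => ht y (by simp [hy])), pvMark,
      if_neg (by simp [hx.1.1]), if_neg hsep]
    rfl

theorem head_dropWhile_false (p : Char → Bool) (l : List Char) (x : Char)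
    (hx : (l.dropWhile p).head? = some x) : p x = false := by
  induction l with
  | nil => simp at hx
  | cons y l ih =>
    rw [List.dropWhile_cons] at hx
    split at hx
    · exact ih hx
    · simp_all

theorem split_marked_head (d : List Char)
    (hd : ∀ x, d.head? = some x → pvOther x = false) :
    ∃ t, (d.flatMap pvMark).splitOn pvMk = [] :: t := by
  cases d with
  | nil => exact ⟨[], by simp [List.splitOn]⟩
  | cons x d =>
    have hx := (pvOther_false_iff x).1 (hd x rfl)
    have hm : ∃ r, pvMark x = pvMk :: r := by
      unfold pvMark
      by_cases hn : pvIsNum x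
      · rw [if_pos hn]; exact ⟨_, rfl⟩
      · rw [if_neg hn, if_pos (by tauto)]; exact ⟨[], rfl⟩
    obtain ⟨r, hr⟩ := hm
    rw [List.flatMap_cons, hr, List.cons_append, splitOn_mk_cons]
    exact ⟨_, rfl⟩

theorem tokensB_eq (cs : List Char) (hdom : ∀ c ∈ cs, c ≠ pvMk) :
    ((cs.flatMap pvMark).splitOn pvMk).flatMap pvPieceF
      = ((pvTok cs).map PySem.Int.toChars).flatten := by
  induction cs using pvTok.induct with
  | case1 => simp [pvTok, List.splitOn, pvPieceF]
  | case2 c cs hnum ih =>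
    have hc : c ≠ pvMk := by
      rintro rfl; exact absurd hnum (by decide)
    rw [List.flatMap_cons, pvMark, if_pos hnum, List.cons_append, List.cons_append,
      List.cons_append, List.nil_append, splitOn_mk_cons, splitOn_cons_ne c _ hc,
      splitOn_mk_cons, List.modifyHead_cons]
    rw [List.flatMap_cons, List.flatMap_cons]
    rw [pvTok, if_pos hnum, List.map_cons, List.flatten_cons, toChars_digit c hnum]
    rw [ih (fun y hy => hdom y (by simp [hy]))]
    simp [pvPieceF, hnum]
  | case3 c cs hnum hsep ih =>
    rw [List.flatMap_cons, pvMark, if_neg (by simp [hnum]), if_pos hsep, List.cons_append,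
      List.nil_append, splitOn_mk_cons, List.flatMap_cons]
    rw [pvTok, if_neg (by simp [hnum]), if_pos hsep]
    rw [ih (fun y hy => hdom y (by simp [hy]))]
    simp [pvPieceF]
  | case4 c cs hnum hsep ih =>
    have hmem_t : ∀ x ∈ cs.takeWhile pvOther, x ∈ cs := fun x hx => (List.takeWhile_sublist _).subset hx
    have hmem_d : ∀ x ∈ cs.dropWhile pvOther, x ∈ cs := fun x hx => (List.dropWhile_sublist _).subset hx
    have hrun : ∀ x ∈ c :: cs.takeWhile pvOther, x ≠ pvMk := by
      intro x hx
      rcases List.mem_cons.1 hx with rfl | hx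
      · exact hdom x (by simp)
      · exact hdom x (List.mem_cons_of_mem _ (hmem_t x hx))
    obtain ⟨tail, htail⟩ := split_marked_head (cs.dropWhile pvOther)
      (fun x hx => head_dropWhile_false pvOther cs x hx)
    have hmarked : (c :: cs).flatMap pvMark
        = (c :: cs.takeWhile pvOther) ++ (cs.dropWhile pvOther).flatMap pvMark := by
      rw [List.flatMap_cons, pvMark, if_neg (by simp [hnum]), if_neg hsep]
      conv_lhs => rw [← List.takeWhile_append_dropWhile (p := pvOther) (l := cs)]
      rw [List.flatMap_append, flatMap_mark_run _ (fun x hx => List.mem_takeWhile_imp hx)]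
      simp
    rw [hmarked, splitOn_run _ _ hrun, htail, List.modifyHead_cons, List.append_nil,
      List.flatMap_cons]
    rw [pvTok, if_neg (by simp [hnum]), if_neg hsep, List.map_cons, List.flatten_cons]
    have hihd : tail.flatMap pvPieceF = ((pvTok (cs.dropWhile pvOther)).map PySem.Int.toChars).flatten := by
      have := ih (fun y hy => hdom y (List.mem_cons_of_mem _ (hmem_d y hy)))
      rw [htail, List.flatMap_cons] at this
      simpa [pvPieceF] using this
    rw [hihd]
    congr 1
    rw [pvPieceF, if_neg (by simp), if_neg (by simp [List.all_cons, hnum])]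
    congr 1

-- ===== VERDICT (by name: the statement is the Claim_ definition above) =====
theorem parse_class_spec : Claim_equal_parse_class := by
  intro s hDom
  unfold Spec_parse_class parse_class parse_class_alt
  have hA : parseClassLoopA s.toList 0 [] = pvTok s.toList := by
    have h := (loopA_char s.toList.length s.toList 0 (by omega)).1 [] (Or.inl rfl)
    simpa using h
  have hdom : ∀ c ∈ s.toList, c ≠ pvMk := by
    intro c hc hEq
    have := List.all_eq_true.1 hDom c hc
    rw [hEq] at this
    simp [pvDomChar, pvMk] at this
  simp only [hA, tokensB_eq s.toList hdom]
  by_cases hnil : pvTok s.toList = []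
  · simp [hnil]
    decide
  · obtain ⟨t, r, hr⟩ := List.exists_cons_of_ne_nil hnil
    rw [hr]
    rw [if_neg (by simp), List.map_cons, List.flatten_cons,
      if_neg (by simp [pvToChars_ne t])]
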